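-- pv_equiv track=rewrite | github.com/yanaiela/demog-text-removal | src/models/data_handler.py | get_labeled_data
-- ===== SOURCE A (Python) =====
-- def get_labeled_data(pos_pos, pos_neg, neg_pos, neg_neg, total, train_s):
--     x_train = []
--     x_test = []
--
--     for x in pos_pos[:train_s]:
--         x_train.append((x, 1, 1))
--     for x in pos_pos[train_s:total]:
--         x_test.append((x, 1, 1))
--
--     for x in pos_neg[:train_s]:
--         x_train.append((x, 1, 0))
--     for x in pos_neg[train_s:total]:
--         x_test.append((x, 1, 0))
--
--     for x in neg_pos[:train_s]:
--         x_train.append((x, 0, 1))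
--     for x in neg_pos[train_s:total]:
--         x_test.append((x, 0, 1))
--
--     for x in neg_neg[:train_s]:
--         x_train.append((x, 0, 0))
--     for x in neg_neg[train_s:total]:
--         x_test.append((x, 0, 0))
--
--     return x_train, x_test
-- ===== SOURCE B (Python) =====
-- def get_labeled_data(pos_pos, pos_neg, neg_pos, neg_neg, total, train_s):
--     # Single pass per list: no slicing; each element is routed to train or test
--     # by comparing its index against the normalized slice bounds.
--     def norm(bound, n):
--         if bound < 0:
--             bound += n
--         return min(max(bound, 0), n)
--
--     x_train = []
--     x_test = []
--     for lst, a, b in ((pos_pos, 1, 1), (pos_neg, 1, 0), (neg_pos, 0, 1), (neg_neg, 0, 0)):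
--         tr = norm(train_s, len(lst))
--         to = norm(total, len(lst))
--         for i, x in enumerate(lst):
--             if i < tr:
--                 x_train.append((x, a, b))
--             elif i < to:
--                 x_test.append((x, a, b))
--     return x_train, x_test
-- ===== Notes on version B (the rewrite author's own statement) =====
-- stated objective: alternative
-- what changed: Instead of materializing two slices per list, B normalizes the slice bounds once per list and makes a single pass over each full list with an index counter, routing every element to train (i < train bound) or test (train bound <= i < total bound) on the fly.
import Mathlib
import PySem

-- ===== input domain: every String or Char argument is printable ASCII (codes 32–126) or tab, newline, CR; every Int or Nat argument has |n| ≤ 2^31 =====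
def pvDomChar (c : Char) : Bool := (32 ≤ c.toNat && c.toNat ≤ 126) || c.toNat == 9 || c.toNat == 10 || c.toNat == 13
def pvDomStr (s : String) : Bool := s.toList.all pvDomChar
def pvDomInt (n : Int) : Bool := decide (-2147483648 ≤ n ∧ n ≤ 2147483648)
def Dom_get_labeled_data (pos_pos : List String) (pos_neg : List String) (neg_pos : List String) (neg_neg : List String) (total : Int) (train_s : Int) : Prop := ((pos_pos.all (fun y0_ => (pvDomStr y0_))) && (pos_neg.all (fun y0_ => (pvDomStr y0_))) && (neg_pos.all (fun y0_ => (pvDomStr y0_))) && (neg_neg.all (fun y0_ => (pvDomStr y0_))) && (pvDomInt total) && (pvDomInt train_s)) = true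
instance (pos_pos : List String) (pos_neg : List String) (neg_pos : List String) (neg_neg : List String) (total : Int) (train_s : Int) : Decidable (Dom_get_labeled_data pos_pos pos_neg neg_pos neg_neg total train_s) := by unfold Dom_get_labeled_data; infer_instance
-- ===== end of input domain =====

-- B avoids slicing: it normalizes the two bounds per list and routes each element in one indexed pass; same O(n) cost, alternative structure.


-- ===== PORT A =====
-- literal transliteration: eight loops over slices, each appending one tuple at a time
def get_labeled_data (pos_pos : List String) (pos_neg : List String) (neg_pos : List String) (neg_neg : List String) (total : Int) (train_s : Int) : (List (String × Int × Int)) × (List (String × Int × Int)) :=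
  let x_train : List (String × Int × Int) := []
  let x_test : List (String × Int × Int) := []
  let x_train := (PySem.List.slice pos_pos none (some train_s)).foldl (fun acc x => acc ++ [(x, 1, 1)]) x_train
  let x_test := (PySem.List.slice pos_pos (some train_s) (some total)).foldl (fun acc x => acc ++ [(x, 1, 1)]) x_test
  let x_train := (PySem.List.slice pos_neg none (some train_s)).foldl (fun acc x => acc ++ [(x, 1, 0)]) x_train
  let x_test := (PySem.List.slice pos_neg (some train_s) (some total)).foldl (fun acc x => acc ++ [(x, 1, 0)]) x_test
  let x_train := (PySem.List.slice neg_pos none (some train_s)).foldl (fun acc x => acc ++ [(x, 0, 1)]) x_train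
  let x_test := (PySem.List.slice neg_pos (some train_s) (some total)).foldl (fun acc x => acc ++ [(x, 0, 1)]) x_test
  let x_train := (PySem.List.slice neg_neg none (some train_s)).foldl (fun acc x => acc ++ [(x, 0, 0)]) x_train
  let x_test := (PySem.List.slice neg_neg (some train_s) (some total)).foldl (fun acc x => acc ++ [(x, 0, 0)]) x_test
  (x_train, x_test)

-- ===== PORT B =====
-- Source B's norm(bound, n): Python slice-bound normalization (negative from the end, clamped to [0, n])
def pvNorm (bound : Int) (n : Nat) : Nat :=
  let b := if bound < 0 then bound + n else bound
  (min (max b 0) (n : Int)).toNat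

-- Source B's inner `for i, x in enumerate(lst)` loop with its if/elif routing
def pvPass (l1 l2 : Int) (lo hi : Nat) : Nat → List String →
    List (String × Int × Int) → List (String × Int × Int) →
    (List (String × Int × Int)) × (List (String × Int × Int))
  | _, [], x_train, x_test => (x_train, x_test)
  | i, x :: rest, x_train, x_test =>
    if i < lo then pvPass l1 l2 lo hi (i + 1) rest (x_train ++ [(x, l1, l2)]) x_test
    else if i < hi then pvPass l1 l2 lo hi (i + 1) rest x_train (x_test ++ [(x, l1, l2)])
    else pvPass l1 l2 lo hi (i + 1) rest x_train x_test

def get_labeled_data_alt (pos_pos : List String) (pos_neg : List String) (neg_pos : List String) (neg_neg : List String) (total : Int) (train_s : Int) : (List (String × Int × Int)) × (List (String × Int × Int)) :=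
  let groups : List (List String × Int × Int) := [(pos_pos, 1, 1), (pos_neg, 1, 0), (neg_pos, 0, 1), (neg_neg, 0, 0)]
  groups.foldl
    (fun st g =>
      let lo := pvNorm train_s g.1.length
      let hi := pvNorm total g.1.length
      pvPass g.2.1 g.2.2 lo hi 0 g.1 st.1 st.2)
    ([], [])

-- ===== PRECONDITION & SPEC =====
def Spec_get_labeled_data (pos_pos : List String) (pos_neg : List String) (neg_pos : List String) (neg_neg : List String) (total : Int) (train_s : Int) (out : (List (String × Int × Int)) × (List (String × Int × Int))) : Prop := out = get_labeled_data_alt pos_pos pos_neg neg_pos neg_neg total train_s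
instance (pos_pos : List String) (pos_neg : List String) (neg_pos : List String) (neg_neg : List String) (total : Int) (train_s : Int) (out : (List (String × Int × Int)) × (List (String × Int × Int))) : Decidable (Spec_get_labeled_data pos_pos pos_neg neg_pos neg_neg total train_s out) := by unfold Spec_get_labeled_data; infer_instance

-- ===== CLAIM =====
def Claim_equal_get_labeled_data : Prop := ∀ (pos_pos : List String) (pos_neg : List String) (neg_pos : List String) (neg_neg : List String) (total : Int) (train_s : Int), Dom_get_labeled_data pos_pos pos_neg neg_pos neg_neg total train_s → Spec_get_labeled_data pos_pos pos_neg neg_pos neg_neg total train_s (get_labeled_data pos_pos pos_neg neg_pos neg_neg total train_s)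

-- ===== LEMMAS AND PROOFS =====
theorem pvNorm_eq_clampIdx (bound : Int) (n : Nat) : pvNorm bound n = PySem.List.clampIdx n bound := by
  simp only [pvNorm, PySem.List.clampIdx, Int.min_def, Int.max_def]
  split_ifs <;> omega

theorem slice_to_norm {α : Type} (xs : List α) (b : Int) :
    PySem.List.slice xs none (some b) = xs.take (pvNorm b xs.length) := by
  simp [PySem.List.slice, pvNorm_eq_clampIdx]

theorem slice_norm {α : Type} (xs : List α) (a b : Int) :
    PySem.List.slice xs (some a) (some b) = (xs.take (pvNorm b xs.length)).drop (pvNorm a xs.length) := by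
  simp [PySem.List.slice, pvNorm_eq_clampIdx, List.drop_take]

theorem foldl_append_map {α β : Type} (f : α → β) (xs : List α) (acc : List β) :
    xs.foldl (fun a x => a ++ [f x]) acc = acc ++ xs.map f := by
  induction xs generalizing acc with
  | nil => simp
  | cons x t ih => simp [ih]

theorem pvPass_eq (l1 l2 : Int) (lo hi : Nat) (xs : List String) (i : Nat)
    (acc1 acc2 : List (String × Int × Int)) :
    pvPass l1 l2 lo hi i xs acc1 acc2 =
      (acc1 ++ (xs.take (lo - i)).map (fun x => (x, l1, l2)),
       acc2 ++ ((xs.take (hi - i)).drop (lo - i)).map (fun x => (x, l1, l2))) := by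
  induction xs generalizing i acc1 acc2 with
  | nil => simp [pvPass]
  | cons x rest ih =>
    by_cases h1 : i < lo
    · have e1 : lo - i = (lo - (i + 1)) + 1 := by omega
      by_cases h2 : i < hi
      · have e2 : hi - i = (hi - (i + 1)) + 1 := by omega
        simp [pvPass, h1, ih, e1, e2, List.take_succ_cons]
      · have e2 : hi - i = 0 := by omega
        have e3 : hi - (i + 1) = 0 := by omega
        simp [pvPass, h1, ih, e1, e2, e3, List.take_succ_cons]
    · have e1 : lo - i = 0 := by omega
      have e1' : lo - (i + 1) = 0 := by omega
      by_cases h2 : i < hi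
      · have e2 : hi - i = (hi - (i + 1)) + 1 := by omega
        simp [pvPass, h1, h2, ih, e1, e1', e2, List.take_succ_cons]
      · have e2 : hi - i = 0 := by omega
        have e3 : hi - (i + 1) = 0 := by omega
        simp [pvPass, h1, h2, ih, e1, e1', e2, e3]

-- ===== VERDICT =====
theorem get_labeled_data_spec : Claim_equal_get_labeled_data := by
  intro pos_pos pos_neg neg_pos neg_neg total train_s _
  unfold Spec_get_labeled_data get_labeled_data get_labeled_data_alt
  simp only [List.foldl, pvPass_eq, Nat.sub_zero, foldl_append_map, slice_to_norm, slice_norm]
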